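-- pv_equiv track=rewrite | github.com/ZoeCD/Mision-09 | Mision_09.py | calcularSuma
-- ===== SOURCE A (Python) =====
-- def calcularSuma(lista):
--     suma = 0
--
--     if len(lista) == 1 and lista[0]!=13:
--         suma = lista[0]
--     else:
--         for k in range(len(lista)):
--             anterior = k-1
--             posterior = k+1
--
--             if k == 0:
--                 if lista[k] != 13 and lista[posterior]!=13:
--                     suma += lista[k]
--
--             elif k == len(lista)-1:
--                 if lista[k] != 13 and lista[anterior] != 13:
--                     suma+=lista[k]
--
--             elif lista[k] !=13 and lista[anterior] != 13 and lista[posterior] != 13: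
--                 suma+=lista[k]
--
--     return suma
-- ===== SOURCE B (Python) =====
-- def calcularSuma(lista):
--     excluded = set()
--     for i, v in enumerate(lista):
--         if v == 13:
--             excluded.update((i - 1, i, i + 1))
--     return sum(v for i, v in enumerate(lista) if i not in excluded)
-- ===== Notes on version B (the rewrite author's own statement) =====
-- stated objective: alternative
-- what changed: A's single index loop with inline k==0 / k==len-1 boundary special-cases and a separate len==1 shortcut is replaced by a two-pass build-then-filter decomposition: first build a set of indices excluded by any 13 (the 13 itself and its in-range neighbours), then sum the elements whose index is not excluded.
import Mathlib
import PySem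

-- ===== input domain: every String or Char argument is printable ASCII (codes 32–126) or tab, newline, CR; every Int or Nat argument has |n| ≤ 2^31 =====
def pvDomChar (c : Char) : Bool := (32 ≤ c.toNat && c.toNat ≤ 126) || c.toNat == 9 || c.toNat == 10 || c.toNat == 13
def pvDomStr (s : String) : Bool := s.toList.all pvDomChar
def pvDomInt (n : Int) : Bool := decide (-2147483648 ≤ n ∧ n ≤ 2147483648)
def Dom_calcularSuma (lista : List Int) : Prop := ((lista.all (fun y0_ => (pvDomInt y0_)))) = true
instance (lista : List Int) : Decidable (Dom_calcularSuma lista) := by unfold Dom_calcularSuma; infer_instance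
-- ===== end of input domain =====

-- B replaces A's index loop with inline boundary special-cases by a two-pass
-- build-then-filter decomposition (a set of excluded indices, then one filtered sum);
-- same O(n) cost, simpler structure.

-- ===== PORT A =====
def calcularSuma (lista : List Int) : Int :=
  let suma : Int := 0
  if lista.length = 1 ∧ PySem.List.pyGetD lista 0 0 ≠ 13 then
    PySem.List.pyGetD lista 0 0
  else
    (PySem.List.pyRange 0 (lista.length : Int) 1).foldl (fun suma k =>
      let anterior := k - 1
      let posterior := k + 1
      if k = 0 then
        if PySem.List.pyGetD lista k 0 ≠ 13 ∧ PySem.List.pyGetD lista posterior 0 ≠ 13 then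
          suma + PySem.List.pyGetD lista k 0
        else suma
      else if k = (lista.length : Int) - 1 then
        if PySem.List.pyGetD lista k 0 ≠ 13 ∧ PySem.List.pyGetD lista anterior 0 ≠ 13 then
          suma + PySem.List.pyGetD lista k 0
        else suma
      else if PySem.List.pyGetD lista k 0 ≠ 13 ∧ PySem.List.pyGetD lista anterior 0 ≠ 13 ∧
              PySem.List.pyGetD lista posterior 0 ≠ 13 then
        suma + PySem.List.pyGetD lista k 0
      else suma) suma

-- ===== PORT B =====
def calcularSuma_alt (lista : List Int) : Int :=
  let excluded : PySem.Set Int :=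
    (PySem.List.enumerate lista).foldl
      (fun s p => if p.2 = 13 then PySem.Set.update s [p.1 - 1, p.1, p.1 + 1] else s)
      PySem.Set.empty
  ((PySem.List.enumerate lista).filter (fun p => !(PySem.Set.contains excluded p.1))).foldl
    (fun acc p => acc + p.2) 0

-- ===== PRECONDITION & SPEC =====
def Spec_calcularSuma (lista : List Int) (out : Int) : Prop := out = calcularSuma_alt lista
instance (lista : List Int) (out : Int) : Decidable (Spec_calcularSuma lista out) := by unfold Spec_calcularSuma; infer_instance

-- ===== CLAIM (what is proved, stated in full; the proofs are below) =====
def Claim_equal_calcularSuma : Prop := ∀ (lista : List Int), Dom_calcularSuma lista → Spec_calcularSuma lista (calcularSuma lista)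

-- ===== LEMMAS AND PROOFS =====

-- An index k is kept iff neither it nor an in-range neighbour holds 13.
def keepB (l : List Int) (k : Nat) : Bool :=
  (l.getD k 0 != 13) && (k == 0 || l.getD (k - 1) 0 != 13) &&
    (k + 1 == l.length || l.getD (k + 1) 0 != 13)

-- common reference value: the sum of the kept elements
def refSum (l : List Int) : Int :=
  ((List.range l.length).map (fun k => if keepB l k then l.getD k 0 else 0)).sum

theorem mem_excl (l : List Int) : ∀ (a : Int) (s : PySem.Set Int) (x : Int),
    (x ∈ (PySem.List.enumerate l a).foldl
      (fun s p => if p.2 = 13 then PySem.Set.update s [p.1 - 1, p.1, p.1 + 1] else s) s) ↔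
    x ∈ s ∨ ∃ j : Nat, j < l.length ∧ l.getD j 0 = 13 ∧
      (x = a + (j : Int) - 1 ∨ x = a + (j : Int) ∨ x = a + (j : Int) + 1) := by
  induction l with
  | nil => intro a s x; simp [PySem.List.enumerate]
  | cons h t ih =>
    intro a s x
    rw [PySem.List.enumerate_cons, List.foldl_cons, ih (a + 1)]
    constructor
    · rintro (hx | ⟨j, hj, h13, hc⟩)
      · by_cases hh : h = 13
        · simp only [hh, reduceIte] at hx
          rw [PySem.Set.mem_update] at hx
          rcases hx with hx | hx
          · exact Or.inl hx
          · refine Or.inr ⟨0, by simp, by simp [hh], ?_⟩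
            simp at hx
            rcases hx with hx | hx | hx <;> simp [hx]
        · simp only [if_neg hh] at hx; exact Or.inl hx
      · refine Or.inr ⟨j + 1, by simpa using Nat.succ_lt_succ hj, by simpa using h13, ?_⟩
        push_cast
        rcases hc with hc | hc | hc
        · left; omega
        · right; left; omega
        · right; right; omega
    · rintro (hx | ⟨j, hj, h13, hc⟩)
      · left
        by_cases hh : h = 13
        · simp only [hh, reduceIte]
          rw [PySem.Set.mem_update]
          exact Or.inl hx
        · simpa only [if_neg hh] using hx
      · match j with
        | 0 =>
          left
          simp only [List.getD_cons_zero] at h13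
          simp only [h13, reduceIte]
          rw [PySem.Set.mem_update]
          right
          simp only [List.mem_cons, List.not_mem_nil, or_false]
          simp only [Nat.cast_zero] at hc
          rcases hc with hc | hc | hc
          · left; omega
          · right; left; omega
          · right; right; omega
        | j + 1 =>
          refine Or.inr ⟨j, by simpa using Nat.lt_of_succ_lt_succ hj, by simpa using h13, ?_⟩
          push_cast at hc ⊢
          rcases hc with hc | hc | hc
          · left; omega
          · right; left; omega
          · right; right; omega

theorem keep_iff (l : List Int) (k : Nat) (hk : k < l.length) :
    keepB l k = true ↔ ¬ ∃ j : Nat, j < l.length ∧ l.getD j 0 = 13 ∧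
      ((k : Int) = (j : Int) - 1 ∨ (k : Int) = (j : Int) ∨ (k : Int) = (j : Int) + 1) := by
  simp only [keepB, Bool.and_eq_true, Bool.or_eq_true, bne_iff_ne, beq_iff_eq]
  constructor
  · rintro ⟨⟨h1, h2⟩, h3⟩ ⟨j, hj, h13, hc⟩
    rcases hc with hc | hc | hc
    · have hjk : j = k + 1 := by omega
      subst hjk
      rcases h3 with h3 | h3
      · omega
      · exact h3 h13
    · have : j = k := by omega
      exact h1 (this ▸ h13)
    · have hk1 : 1 ≤ k := by omega
      have hjk : j = k - 1 := by omega
      subst hjk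
      rcases h2 with h2 | h2
      · omega
      · exact h2 h13
  · intro hne
    refine ⟨⟨?_, ?_⟩, ?_⟩
    · intro h13
      exact hne ⟨k, hk, h13, Or.inr (Or.inl rfl)⟩
    · by_cases hk0 : k = 0
      · exact Or.inl hk0
      · refine Or.inr fun h13 => hne ⟨k - 1, by omega, h13, Or.inr (Or.inr (by omega))⟩
    · by_cases hkn : k + 1 = l.length
      · exact Or.inl hkn
      · refine Or.inr fun h13 => hne ⟨k + 1, by omega, h13, Or.inl (by push_cast; omega)⟩

theorem sum_filter_eq (p : Int × Int → Bool) (xs : List (Int × Int)) :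
    ((xs.filter p).map (fun q => q.2)).sum = (xs.map (fun q => if p q then q.2 else 0)).sum := by
  induction xs with
  | nil => simp
  | cons h t ih =>
    by_cases hp : p h <;> simp [hp, ih]

theorem b_eq_ref (l : List Int) : calcularSuma_alt l = refSum l := by
  dsimp only [calcularSuma_alt]
  set E := List.foldl
      (fun (s : PySem.Set Int) (p : Int × Int) =>
        if p.2 = 13 then PySem.Set.update s [p.1 - 1, p.1, p.1 + 1] else s)
      PySem.Set.empty (PySem.List.enumerate l) with hE
  have hmemE : ∀ x : Int, x ∈ E ↔ ∃ j : Nat, j < l.length ∧ l.getD j 0 = 13 ∧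
      (x = (j : Int) - 1 ∨ x = (j : Int) ∨ x = (j : Int) + 1) := by
    intro x
    rw [hE]
    simpa [PySem.Set.empty] using mem_excl l 0 PySem.Set.empty x
  rw [PySem.List.foldl_add, sum_filter_eq]
  rw [PySem.List.enumerate_eq_map_pyRange l 0]
  have hlen : PySem.List.len l = (l.length : Int) := by simp [PySem.List.len]
  rw [hlen, PySem.List.pyRange_one, List.map_map, List.map_map]
  unfold refSum
  simp only [Int.sub_zero, Int.toNat_natCast, zero_add]
  refine congrArg List.sum (List.map_congr_left ?_)
  intro k hk
  simp only [List.mem_range] at hk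
  simp only [Function.comp_apply, PySem.List.pyGetD_natCast]
  by_cases hkeep : keepB l k = true
  · have hc : E.contains (k : Int) = false := by
      rw [← Bool.not_eq_true, PySem.Set.contains_iff, hmemE]
      exact (keep_iff l k hk).mp hkeep
    simp [hkeep]
    intro hmem
    have hct := (PySem.Set.contains_iff E ((k : Nat) : Int)).mpr hmem
    rw [hc] at hct
    exact absurd hct Bool.false_ne_true
  · have hex := not_not.mp (mt (keep_iff l k hk).mpr hkeep)
    have hc : E.contains (k : Int) = true := by
      rw [PySem.Set.contains_iff, hmemE]
      exact hex
    simp [hkeep]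
    exact fun h => absurd ((PySem.Set.contains_iff E ((k : Nat) : Int)).mp hc) h

theorem a_eq_ref (l : List Int) : calcularSuma l = refSum l := by
  dsimp only [calcularSuma]
  by_cases hone : l.length = 1 ∧ PySem.List.pyGetD l 0 0 ≠ 13
  · rw [if_pos hone]
    obtain ⟨x, rfl⟩ := List.length_eq_one_iff.mp hone.1
    have hx : x ≠ 13 := by simpa [PySem.List.pyGetD_zero] using hone.2
    simp [refSum, keepB, PySem.List.pyGetD_zero, hx]
  · rw [if_neg hone]
    rw [PySem.List.pyRange_one, List.foldl_map]
    simp only [Int.sub_zero, Int.toNat_natCast, zero_add]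
    rw [PySem.List.foldl_congr_mem _ _
      (fun suma k => suma + (if keepB l k then l.getD k 0 else 0)) 0 ?_]
    · rw [PySem.List.foldl_add]
      simp [refSum]
    · intro acc k hkmem
      simp only [List.mem_range] at hkmem
      simp only []
      have e1 : ((k : Nat) : Int) + 1 = (((k + 1 : Nat)) : Int) := by push_cast; ring
      rw [e1]
      simp only [PySem.List.pyGetD_natCast]
      by_cases hk0 : k = 0
      · subst hk0
        simp only [Nat.cast_zero]
        simp only [if_true]
        by_cases hkn : 0 + 1 = l.length
        · have hd : l.getD (0 + 1) 0 = 0 := List.getD_eq_default _ _ (by omega)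
          simp only [keepB, Bool.and_eq_true, Bool.or_eq_true, bne_iff_ne, beq_iff_eq, hd, true_or, and_true]
          split_ifs <;> first | rfl | omega
        · simp only [keepB, Bool.and_eq_true, Bool.or_eq_true, bne_iff_ne, beq_iff_eq, true_or, and_true]
          split_ifs <;> first | rfl | omega
      · have e2 : ((k : Nat) : Int) - 1 = (((k - 1 : Nat)) : Int) := by omega
        rw [if_neg (by omega : ¬(((k : Nat) : Int) = 0)), e2]
        simp only [PySem.List.pyGetD_natCast]
        by_cases hkn : k + 1 = l.length
        · rw [if_pos (by omega : ((k : Nat) : Int) = (l.length : Int) - 1)]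
          have hd : l.getD (k + 1) 0 = 0 := List.getD_eq_default _ _ (by omega)
          simp only [keepB, Bool.and_eq_true, Bool.or_eq_true, bne_iff_ne, beq_iff_eq, hd]
          split_ifs <;> first | rfl | omega
        · rw [if_neg (by omega : ¬(((k : Nat) : Int) = (l.length : Int) - 1))]
          simp only [keepB, Bool.and_eq_true, Bool.or_eq_true, bne_iff_ne, beq_iff_eq]
          split_ifs <;> first | rfl | omega

-- ===== VERDICT (by name: the statement is the Claim_ definition above) =====
theorem calcularSuma_spec : Claim_equal_calcularSuma := by
  intro lista _
  unfold Spec_calcularSuma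
  rw [a_eq_ref, b_eq_ref]
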